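-- pv_equiv track=rewrite | github.com/InsightCenterNoodles/Rigatoni | rigatoni/geometry/geometry_creation.py | convert
-- ===== SOURCE A (Python) =====
-- def convert(color: int):
--     """Helper to convert decimal pymesh values to RGBA array"""
--
--     rgb = []
--     for i in range(4):
--         rgb.append(color % 256)
--         color = color // 256
--
--     alpha = rgb.pop(0)
--     rgb.append(alpha)
--     return rgb
-- ===== SOURCE B (Python) =====
-- def convert(color: int):
--     """Helper to convert decimal pymesh values to RGBA array"""
--     return [(color // 256) % 256,
--             (color // 65536) % 256,
--             (color // 16777216) % 256,
--             color % 256]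
-- ===== Notes on version B (the rewrite author's own statement) =====
-- stated objective: simpler
-- what changed: Replaces the loop that accumulates bytes plus the pop(0)/append rotation with a single closed-form list literal computing each output byte directly via floor-division and modulo.
import Mathlib
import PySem

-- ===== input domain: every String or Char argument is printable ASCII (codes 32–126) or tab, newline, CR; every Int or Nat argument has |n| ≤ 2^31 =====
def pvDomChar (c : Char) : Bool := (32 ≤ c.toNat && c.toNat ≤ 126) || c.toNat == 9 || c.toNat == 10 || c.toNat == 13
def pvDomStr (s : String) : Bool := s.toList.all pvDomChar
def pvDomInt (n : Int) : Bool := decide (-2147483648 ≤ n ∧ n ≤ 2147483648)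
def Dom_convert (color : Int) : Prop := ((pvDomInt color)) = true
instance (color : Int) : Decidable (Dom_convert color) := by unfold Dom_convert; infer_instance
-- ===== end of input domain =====

-- B replaces A's byte-accumulating loop and pop(0)/append rotation with one closed-form list literal (simpler).


-- ===== PORT A =====
-- loop: for i in range(4): rgb.append(color % 256); color = color // 256
def convert (color : Int) : List Int :=
  let st := (PySem.List.pyRange 0 4 1).foldl
    (fun (s : List Int × Int) _ =>
      (s.1 ++ [PySem.Int.mod s.2 256], PySem.Int.floordiv s.2 256)) ([], color)
  -- alpha = rgb.pop(0); rgb.append(alpha)  (rgb has 4 elements, so pop(0) never raises)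
  match st.1 with
  | a :: rest => rest ++ [a]
  | [] => []

-- ===== PORT B =====
def convert_alt (color : Int) : List Int :=
  [PySem.Int.mod (PySem.Int.floordiv color 256) 256,
   PySem.Int.mod (PySem.Int.floordiv color 65536) 256,
   PySem.Int.mod (PySem.Int.floordiv color 16777216) 256,
   PySem.Int.mod color 256]

-- ===== PRECONDITION & SPEC =====
def Spec_convert (color : Int) (out : List Int) : Prop := out = convert_alt color
instance (color : Int) (out : List Int) : Decidable (Spec_convert color out) := by unfold Spec_convert; infer_instance

-- ===== CLAIM (what is proved, stated in full; the proofs are below) =====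
def Claim_equal_convert : Prop := ∀ (color : Int), Dom_convert color → Spec_convert color (convert color)

-- ===== LEMMAS AND PROOFS =====

-- ===== VERDICT (by name: the statement is the Claim_ definition above) =====
theorem convert_spec : Claim_equal_convert := by
  intro color _
  show convert color = convert_alt color
  have h1 : color / 256 / 256 = color / 65536 := by
    rw [Int.ediv_ediv_of_nonneg (by norm_num : (0:Int) ≤ 256)]; norm_num
  have h2 : color / 65536 / 256 = color / 16777216 := by
    rw [Int.ediv_ediv_of_nonneg (by norm_num : (0:Int) ≤ 65536)]; norm_num
  simp only [convert, convert_alt, PySem.List.pyRange]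
  simp [List.range_succ]
  rw [h1, h2]
  exact ⟨rfl, rfl⟩
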